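-- pv_equiv track=rewrite | github.com/macul99/algo_study | num_item_bigger_in_front.py | count_bigger_fenwick_or_equal
-- ===== SOURCE A (Python) =====
-- def count_bigger_fenwick_or_equal(nums):
--     """
--     Fenwick Tree: Count bigger OR EQUAL elements
--     Time Complexity: O(n log n)
--     Space Complexity: O(n)
--
--     i & -i keep only the right most bit of i
--     """
--     sorted_unique = sorted(set(nums))
--     idx_map = {v: i for i, v in enumerate(sorted_unique)}
--     n = len(sorted_unique)
--     tree = [0] * (n + 2)
--
--     def update(i):
--         i += 1 # 1-indexed
--         while i < len(tree):
--             tree[i] += 1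
--             i += i & -i # moves up the tree hierarchy
--
--     def query(i):
--         res = 0
--         i += 1 # 1-indexed
--         while i > 0:
--             res += tree[i]
--             i -= i & -i # moves down the tree hierarchy
--         return res
--
--     result = []
--     for num in nums:
--         idx = idx_map[num]
--         # Count elements < current value, subtract from total to get >= elements
--         total_seen = len(result)
--         if idx > 0:
--             elements_less_current = query(idx - 1)
--         else:
--             elements_less_current = 0
--         bigger_or_equal_count = total_seen - elements_less_current
--         result.append(bigger_or_equal_count)
--         update(idx)
--
--     return result
-- ===== SOURCE B (Python) =====
-- def count_bigger_fenwick_or_equal(nums):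
--     result = []
--     seen = []
--     for num in nums:
--         result.append(sum(1 for x in seen if x >= num))
--         seen.append(num)
--     return result
-- ===== Notes on version B (the rewrite author's own statement) =====
-- stated objective: simpler
-- what changed: Drops the coordinate compression and the Fenwick tree entirely: a single pass keeps the list of already-seen values and counts those >= the current element by a direct inner scan.
import Mathlib
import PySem

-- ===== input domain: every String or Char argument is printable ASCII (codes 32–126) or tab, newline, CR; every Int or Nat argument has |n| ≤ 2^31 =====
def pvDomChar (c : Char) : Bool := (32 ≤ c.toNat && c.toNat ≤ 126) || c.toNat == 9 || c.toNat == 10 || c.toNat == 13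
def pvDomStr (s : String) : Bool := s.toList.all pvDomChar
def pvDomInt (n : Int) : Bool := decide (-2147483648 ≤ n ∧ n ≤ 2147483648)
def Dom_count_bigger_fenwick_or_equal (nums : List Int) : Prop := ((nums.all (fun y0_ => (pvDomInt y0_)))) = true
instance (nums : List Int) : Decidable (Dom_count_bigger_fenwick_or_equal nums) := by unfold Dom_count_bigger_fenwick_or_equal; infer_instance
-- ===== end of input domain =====

-- B replaces A's coordinate compression + Fenwick tree by a direct one-pass scan of the
-- already-seen prefix (simpler, no speed claim); both return, for each position, how many
-- earlier elements are >= the current one.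

-- ===== PORT A =====
-- Facts about `i & -i` needed by the loops' termination (cited in decreasing_by).
theorem pvBand_eq (i : Int) (h : 0 < i) :
    PySem.Int.band i (-i) = ((i.toNat - (i.toNat &&& (i.toNat - 1)) : Nat) : Int) := by
  have h1 : (0 : Int) ≤ i := le_of_lt h
  have h2 : ¬ (0 : Int) ≤ -i := by omega
  have h3 : (-(-i) - 1).toNat = i.toNat - 1 := by omega
  simp only [PySem.Int.band]
  rw [if_pos h1, if_neg h2, h3]

theorem pvBand_pos (i : Int) (h : 0 < i) : 0 < PySem.Int.band i (-i) := by
  rw [pvBand_eq i h]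
  have h1 : i.toNat &&& (i.toNat - 1) ≤ i.toNat - 1 := Nat.and_le_right
  omega

-- `update`: while i < len(tree): tree[i] += 1; i += i & -i.
-- The extra conjunct 0 < i (true on every call A makes: i starts at idx+1 ≥ 1 and grows)
-- only makes the loop total; tree[i] via pyGetD/pySetD is exact since 0 ≤ i < len(tree) there.
def pvUpdate (tree : List Int) (i : Int) : List Int :=
  if h : i < (tree.length : Int) ∧ 0 < i then
    pvUpdate (PySem.List.pySetD tree i (PySem.List.pyGetD tree i 0 + 1)) (i + PySem.Int.band i (-i))
  else tree
termination_by ((tree.length : Int) - i).toNat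
decreasing_by
  have hp := pvBand_pos i h.2
  simp only [PySem.List.length_pySetD]
  omega

-- `query`: res = 0; while i > 0: res += tree[i]; i -= i & -i  (tree[i] in range on A's calls)
def pvQuery (tree : List Int) (i : Int) (res : Int) : Int :=
  if h : 0 < i then
    pvQuery tree (i - PySem.Int.band i (-i)) (res + PySem.List.pyGetD tree i 0)
  else res
termination_by i.toNat
decreasing_by
  have hp := pvBand_pos i h
  omega

def count_bigger_fenwick_or_equal (nums : List Int) : List Int :=
  let sorted_unique := PySem.List.sorted (PySem.Set.ofList nums) (fun x => x) false
  let idx_map : PySem.Dict Int Int :=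
    PySem.Dict.ofList ((PySem.List.enumerate sorted_unique 0).map (fun p => (p.2, p.1)))
  let n := sorted_unique.length
  let tree : List Int := List.replicate (n + 2) 0
  (nums.foldl
    (fun (st : List Int × List Int) num =>
      let idx : Int := (idx_map.get? num).getD 0    -- KeyError unreachable: num ∈ sorted_unique
      let total_seen : Int := PySem.List.len st.1
      let elements_less_current : Int :=
        if idx > 0 then pvQuery st.2 ((idx - 1) + 1) 0 else 0
      (st.1 ++ [total_seen - elements_less_current], pvUpdate st.2 (idx + 1)))
    ([], tree)).1

-- ===== PORT B =====
def count_bigger_fenwick_or_equal_alt (nums : List Int) : List Int :=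
  (nums.foldl
    (fun (st : List Int × List Int) num =>
      (st.1 ++ [((st.2.filter (fun x => num ≤ x)).map (fun _ => (1 : Int))).sum],
       st.2 ++ [num]))
    ([], [])).1

-- ===== PRECONDITION & SPEC =====
def Spec_count_bigger_fenwick_or_equal (nums : List Int) (out : List Int) : Prop := out = count_bigger_fenwick_or_equal_alt nums
instance (nums : List Int) (out : List Int) : Decidable (Spec_count_bigger_fenwick_or_equal nums out) := by unfold Spec_count_bigger_fenwick_or_equal; infer_instance

-- ===== CLAIM (what is proved, stated in full; the proofs are below) =====
def Claim_equal_count_bigger_fenwick_or_equal : Prop := ∀ (nums : List Int), Dom_count_bigger_fenwick_or_equal nums → Spec_count_bigger_fenwick_or_equal nums (count_bigger_fenwick_or_equal nums)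

-- ===== LEMMAS AND PROOFS =====

-- 2-adic valuation and the lowest set bit 2^(pvV2 m)
def pvV2 (m : Nat) : Nat :=
  if h : m = 0 ∨ m % 2 = 1 then 0 else pvV2 (m / 2) + 1
termination_by m
decreasing_by omega

def pvLowN (m : Nat) : Nat := 2 ^ pvV2 m

theorem pvLowN_pos (m : Nat) : 0 < pvLowN m := Nat.two_pow_pos _

theorem pvV2_spec (m : Nat) (h : 0 < m) : ∃ t, m = 2 ^ pvV2 m * (2 * t + 1) := by
  induction m using Nat.strong_induction_on with
  | _ m ih =>
    by_cases hodd : m % 2 = 1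
    · rw [pvV2, dif_pos (Or.inr hodd)]
      refine ⟨m / 2, ?_⟩
      simp only [pow_zero, one_mul]
      omega
    · rw [pvV2, dif_neg (by omega)]
      obtain ⟨t, ht⟩ := ih (m / 2) (by omega) (by omega)
      refine ⟨t, ?_⟩
      rw [pow_succ]
      have hm : m = 2 * (m / 2) := by omega
      conv_lhs => rw [hm, ht]
      ring

theorem pvLowN_dvd (m : Nat) (h : 0 < m) : pvLowN m ∣ m := by
  obtain ⟨t, ht⟩ := pvV2_spec m h
  exact ⟨2 * t + 1, ht⟩

theorem pvLowN_le (m : Nat) (h : 0 < m) : pvLowN m ≤ m :=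
  Nat.le_of_dvd h (pvLowN_dvd m h)

theorem pvV2_ge_of_dvd (m k : Nat) (h : 0 < m) (hd : 2 ^ k ∣ m) : k ≤ pvV2 m := by
  by_contra hc
  obtain ⟨t, ht⟩ := pvV2_spec m h
  obtain ⟨v, hv⟩ : ∃ v, pvV2 m = v := ⟨_, rfl⟩
  rw [hv] at ht hc
  have hk : v + 1 ≤ k := by omega
  obtain ⟨d, hd'⟩ := dvd_trans (pow_dvd_pow 2 hk) hd
  have h4 : 2 ^ v * (2 * t + 1) = 2 ^ v * (2 * d) := by
    rw [← ht, hd', pow_succ]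
    ring
  have h3 := Nat.eq_of_mul_eq_mul_left (Nat.two_pow_pos v) h4
  omega

theorem pvV2_succ_not_dvd (m : Nat) (h : 0 < m) : ¬ 2 ^ (pvV2 m + 1) ∣ m := by
  intro hd
  have := pvV2_ge_of_dvd m (pvV2 m + 1) h hd
  omega

theorem pvV2_eq (m k : Nat) (h : 0 < m) (hd : 2 ^ k ∣ m) (hnd : ¬ 2 ^ (k + 1) ∣ m) :
    pvV2 m = k := by
  have h1 := pvV2_ge_of_dvd m k h hd
  by_contra hc
  have hk : k + 1 ≤ pvV2 m := by omega
  exact hnd (dvd_trans (pow_dvd_pow 2 hk) (pvLowN_dvd m h))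

theorem pvLowN_decomp (m : Nat) (h : 0 < m) : ∃ t, m = pvLowN m + 2 * pvLowN m * t := by
  obtain ⟨t, ht⟩ := pvV2_spec m h
  refine ⟨t, ?_⟩
  conv_lhs => rw [ht]
  unfold pvLowN
  ring

-- growth of the low bit along the update chain
theorem pvLowN_add_self (m : Nat) (h : 0 < m) : 2 * pvLowN m ≤ pvLowN (m + pvLowN m) := by
  obtain ⟨t, ht⟩ := pvV2_spec m h
  obtain ⟨v, hv⟩ : ∃ v, pvV2 m = v := ⟨_, rfl⟩
  rw [hv] at ht
  have hL : pvLowN m = 2 ^ v := by rw [pvLowN, hv]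
  have hdvd : 2 ^ (v + 1) ∣ (m + pvLowN m) := by
    refine ⟨t + 1, ?_⟩
    rw [hL, ht, pow_succ]
    ring
  have h3 : v + 1 ≤ pvV2 (m + pvLowN m) :=
    pvV2_ge_of_dvd _ _ (by have := pvLowN_pos m; omega) hdvd
  calc 2 * pvLowN m = 2 ^ (v + 1) := by rw [hL, pow_succ]; ring
    _ ≤ 2 ^ pvV2 (m + pvLowN m) := Nat.pow_le_pow_right (by norm_num) h3
    _ = pvLowN (m + pvLowN m) := rfl

-- the chain step: two cells covering p, the larger is reached from the smaller
theorem pvChainStep (i j p : Nat) (hi : 0 < i)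
    (hci : i - pvLowN i < p ∧ p ≤ i) (hcj : j - pvLowN j < p ∧ p ≤ j) (hij : i < j) :
    i + pvLowN i ≤ j := by
  have hj : 0 < j := by omega
  obtain ⟨s, hs⟩ := pvLowN_decomp j hj
  set b := pvV2 j with hb
  have hLj : pvLowN j = 2 ^ b := rfl
  set D := 2 ^ b * s with hD
  have hs' : j = 2 ^ b + 2 * D := by rw [hs, hLj, hD]; ring
  have hLb := pvLowN_pos j
  set r := i - 2 * D with hr
  have hjr : j - pvLowN j = 2 * D := by omega
  have hrlb : 1 ≤ r := by omega
  have hi_eq : i = 2 * D + r := by omega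
  have hrub : r < 2 ^ b := by omega
  set c := pvV2 r with hc
  have hrpos : 0 < r := hrlb
  have hdvd_r : 2 ^ c ∣ r := pvLowN_dvd r hrpos
  have hLr : pvLowN r = 2 ^ c := rfl
  have h2c := Nat.two_pow_pos c
  have hcb : c < b := by
    have h1 := pvLowN_le r hrpos
    rw [hLr] at h1
    by_contra hcb
    have : (2:Nat) ^ b ≤ 2 ^ c := Nat.pow_le_pow_right (by norm_num) (by omega)
    omega
  have hdvd_D : 2 ^ c ∣ D := by
    rw [hD]
    exact Dvd.dvd.mul_right (pow_dvd_pow 2 (by omega)) s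
  have hdvd_i : 2 ^ c ∣ i := by
    rw [hi_eq]
    exact Nat.dvd_add (Dvd.dvd.mul_left hdvd_D 2) hdvd_r
  have hnd_i : ¬ 2 ^ (c + 1) ∣ i := by
    intro hd
    have hdvd_D2 : (2:Nat) ^ (c + 1) ∣ 2 * D := by
      rw [hD]
      have h1 : (2:Nat) ^ (c + 1) ∣ 2 ^ (b + 1) := pow_dvd_pow 2 (by omega)
      have h2 : (2:Nat) ^ (b + 1) = 2 * 2 ^ b := by rw [pow_succ]; ring
      rw [h2] at h1
      exact dvd_trans h1 ⟨s, by ring⟩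
    have hdr : (2:Nat) ^ (c + 1) ∣ r := by
      rw [hr]
      have h5 : i - 2 * D = i - 2 * D := rfl
      exact Nat.dvd_sub hd hdvd_D2
    rw [hc] at hdr
    exact pvV2_succ_not_dvd r hrpos hdr
  have hLi : pvLowN i = 2 ^ c := by rw [pvLowN, pvV2_eq i c hi hdvd_i hnd_i]
  obtain ⟨u, hu⟩ := pvV2_spec r hrpos
  have hru : r = 2 ^ c * (2 * u + 1) := by rw [hc]; exact hu
  have hsplit : (2:Nat) ^ b = 2 ^ c * 2 ^ (b - c) := by rw [← pow_add]; congr 1; omega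
  have hstep : 2 * u + 1 < 2 ^ (b - c) := by
    by_contra hcon
    have h1 : 2 ^ c * 2 ^ (b - c) ≤ 2 ^ c * (2 * u + 1) := Nat.mul_le_mul_left _ (by omega)
    omega
  have heven : 2 * u + 2 ≤ 2 ^ (b - c) := by
    obtain ⟨w, hw⟩ := dvd_pow_self 2 (by omega : b - c ≠ 0)
    omega
  have hfinal : r + 2 ^ c ≤ 2 ^ b := by
    have h1 : r + 2 ^ c = 2 ^ c * (2 * u + 2) := by rw [hru]; ring
    have h2 : 2 ^ c * (2 * u + 2) ≤ 2 ^ c * 2 ^ (b - c) := Nat.mul_le_mul_left _ heven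
    omega
  rw [hLi]
  omega

-- the Nat value of `i & -i`
theorem pvAnd_two_mul_odd (a : Nat) : (2 * a + 1) &&& (2 * a) = 2 * a := by
  apply Nat.eq_of_testBit_eq
  intro i
  rw [Nat.testBit_and]
  cases i with
  | zero =>
    rw [Nat.testBit_zero, Nat.testBit_zero]
    have h1 : (2 * a + 1) % 2 = 1 := by omega
    have h2 : (2 * a) % 2 = 0 := by omega
    rw [h1, h2]
    simp
  | succ i =>
    rw [Nat.testBit_succ, Nat.testBit_succ]
    have h1 : (2 * a + 1) / 2 = a := by omega
    have h2 : (2 * a) / 2 = a := by omega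
    rw [h1, h2]
    simp

theorem pvAnd_two_mul_pred (a : Nat) (ha : 0 < a) :
    (2 * a) &&& (2 * a - 1) = 2 * (a &&& (a - 1)) := by
  apply Nat.eq_of_testBit_eq
  intro i
  rw [Nat.testBit_and]
  cases i with
  | zero =>
    rw [Nat.testBit_zero, Nat.testBit_zero, Nat.testBit_zero]
    have h1 : (2 * a) % 2 = 0 := by omega
    have h2 : (2 * (a &&& (a - 1))) % 2 = 0 := by omega
    rw [h1, h2]
    simp
  | succ i =>
    rw [Nat.testBit_succ, Nat.testBit_succ, Nat.testBit_succ]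
    have h1 : (2 * a) / 2 = a := by omega
    have h2 : (2 * a - 1) / 2 = a - 1 := by omega
    have h3 : (2 * (a &&& (a - 1))) / 2 = a &&& (a - 1) := by omega
    rw [h1, h2, h3, Nat.testBit_and]

theorem pvSub_and (m : Nat) (h : 0 < m) : m - (m &&& (m - 1)) = pvLowN m := by
  induction m using Nat.strong_induction_on with
  | _ m ih =>
    by_cases hodd : m % 2 = 1
    · set a := m / 2 with ha
      have hm : m = 2 * a + 1 := by omega
      rw [hm]
      have h1 : 2 * a + 1 - 1 = 2 * a := by omega
      rw [h1, pvAnd_two_mul_odd]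
      have hv : pvV2 (2 * a + 1) = 0 := by
        rw [pvV2, dif_pos (Or.inr (by omega))]
      rw [pvLowN, hv, pow_zero]
      omega
    · set a := m / 2 with ha
      have ha0 : 0 < a := by omega
      have hm : m = 2 * a := by omega
      rw [hm]
      have h1 : 2 * a - 1 = 2 * a - 1 := rfl
      rw [pvAnd_two_mul_pred a ha0]
      have ihm := ih a (by omega) ha0
      have hle : a &&& (a - 1) ≤ a := Nat.and_le_left
      have hv : pvV2 (2 * a) = pvV2 a + 1 := by
        have h2 : 2 * a / 2 = a := by omega
        rw [pvV2, dif_neg (by omega), h2]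
      rw [pvLowN, hv, pow_succ]
      rw [pvLowN] at ihm
      omega

theorem pvBand_eq_lowN (i : Int) (h : 0 < i) :
    PySem.Int.band i (-i) = ((pvLowN i.toNat : Nat) : Int) := by
  rw [pvBand_eq i h, pvSub_and i.toNat (by omega)]

-- ===== position and tree-invariant machinery =====

-- position of x in the strictly sorted list of distinct values
def pvPos (vals : List Int) (x : Int) : Nat := vals.countP (fun y => decide (y < x))

theorem pvPos_getElem (vals : List Int) (hp : vals.Pairwise (· < ·)) (k : Nat)
    (hk : k < vals.length) : pvPos vals vals[k] = k := by
  induction vals generalizing k with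
  | nil => simp at hk
  | cons v vs ih =>
    rw [List.pairwise_cons] at hp
    obtain ⟨hv, hvs⟩ := hp
    cases k with
    | zero =>
      simp only [List.getElem_cons_zero]
      rw [pvPos, List.countP_eq_zero]
      intro a ha
      simp only [decide_eq_true_eq]
      rcases List.mem_cons.mp ha with h | h
      · subst h
        omega
      · have := hv a h
        omega
    | succ k =>
      have hk' : k < vs.length := by simpa using hk
      have hlt : v < vs[k] := hv _ (List.getElem_mem hk')
      have ihk := ih hvs k hk'
      simp only [List.getElem_cons_succ]
      rw [pvPos, List.countP_cons]
      have h2 : (decide (v < vs[k])) = true := by simp [hlt]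
      rw [h2, if_pos rfl]
      rw [pvPos] at ihk
      omega

theorem pvPos_lt_length (vals : List Int) (hp : vals.Pairwise (· < ·)) (x : Int)
    (hx : x ∈ vals) : pvPos vals x < vals.length := by
  obtain ⟨k, hk, rfl⟩ := List.getElem_of_mem hx
  rw [pvPos_getElem vals hp k hk]
  exact hk

theorem pvPos_lt_iff (vals : List Int) (hp : vals.Pairwise (· < ·)) (x y : Int)
    (hx : x ∈ vals) (hy : y ∈ vals) : pvPos vals x < pvPos vals y ↔ x < y := by
  obtain ⟨i, hi, rfl⟩ := List.getElem_of_mem hx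
  obtain ⟨j, hj, rfl⟩ := List.getElem_of_mem hy
  rw [pvPos_getElem vals hp i hi, pvPos_getElem vals hp j hj]
  rw [List.pairwise_iff_getElem] at hp
  constructor
  · intro h
    exact hp i j hi hj h
  · intro h
    by_contra hc
    rcases Nat.eq_or_lt_of_le (not_lt.mp hc) with heq | hlt
    · subst heq
      exact lt_irrefl _ h
    · exact absurd h (not_lt.mpr (le_of_lt (hp j i hj hi hlt)))

-- the Fenwick invariant: cell j counts the seen elements whose (position+1) lies in (j - low j, j]
def pvTI (vals tree pref : List Int) : Prop :=
  tree.length = vals.length + 2 ∧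
  ∀ j : Nat, 1 ≤ j → j ≤ vals.length + 1 →
    tree.getD j 0 =
      (pref.countP (fun x => decide (j - pvLowN j < pvPos vals x + 1 ∧ pvPos vals x + 1 ≤ j)) : Int)

-- counting split over an interval
theorem pvCountP_le_split (vals l : List Int) (a b : Nat) (hab : a ≤ b) :
    l.countP (fun x => decide (pvPos vals x + 1 ≤ b)) =
      l.countP (fun x => decide (pvPos vals x + 1 ≤ a)) +
      l.countP (fun x => decide (a < pvPos vals x + 1 ∧ pvPos vals x + 1 ≤ b)) := by
  induction l with
  | nil => simp
  | cons x t ih =>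
    simp only [List.countP_cons, decide_eq_true_eq]
    rw [ih]
    split_ifs <;> omega

theorem pvUpdate_length (tree : List Int) (i : Int) : (pvUpdate tree i).length = tree.length := by
  fun_induction pvUpdate tree i with
  | case1 tree i h ih => rw [ih, PySem.List.length_pySetD]
  | case2 tree i h => rfl

-- the update loop adds 1 exactly to the cells covering p (at or above i)
theorem pvUpdate_getD (p : Nat) : ∀ (k : Nat) (tree : List Int) (i : Nat),
    tree.length - i ≤ k → 1 ≤ i → i - pvLowN i < p → p ≤ i →
    ∀ j : Nat, 1 ≤ j → j + 1 ≤ tree.length →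
      (pvUpdate tree (i : Int)).getD j 0 =
        tree.getD j 0 + (if j - pvLowN j < p ∧ p ≤ j ∧ i ≤ j then 1 else 0) := by
  intro k
  induction k with
  | zero =>
    intro tree i hk hi hci1 hci2 j hj hjl
    rw [pvUpdate.eq_def, dif_neg (by omega)]
    have : ¬ (j - pvLowN j < p ∧ p ≤ j ∧ i ≤ j) := by omega
    simp [this]
  | succ k ih =>
    intro tree i hk hi hci1 hci2 j hj hjl
    by_cases hlt : i < tree.length
    · rw [pvUpdate.eq_def, dif_pos (by omega)]
      have hlow_pos := pvLowN_pos i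
      have hlow2 := pvLowN_add_self i (by omega)
      have hband : PySem.Int.band (i : Int) (-(i : Int)) = ((pvLowN i : Nat) : Int) := by
        rw [pvBand_eq_lowN _ (by omega)]
        simp
      have hstep : (i : Int) + PySem.Int.band (i : Int) (-(i : Int)) = ((i + pvLowN i : Nat) : Int) := by
        rw [hband]; push_cast; ring
      rw [hstep]
      set tree1 := PySem.List.pySetD tree (i : Int) (PySem.List.pyGetD tree (i : Int) 0 + 1) with htree1
      have hlen1 : tree1.length = tree.length := PySem.List.length_pySetD _ _ _
      have h1 : tree1 = tree.set i (tree.getD i 0 + 1) := by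
        rw [htree1, PySem.List.pySetD_natCast]
        congr 1
        rw [PySem.List.pyGetD_natCast]
      have ihres := ih tree1 (i + pvLowN i) (by omega) (by omega)
        (by omega) (by omega) j hj (by omega)
      rw [ihres]
      have hgeteq : tree1.getD i 0 = tree.getD i 0 + 1 := by
        rw [h1, List.getD_eq_getElem?_getD, List.getElem?_set_self hlt]
        rfl
      have hgetne : ∀ j' : Nat, j' ≠ i → tree1.getD j' 0 = tree.getD j' 0 := by
        intro j' hne
        rw [h1, List.getD_eq_getElem?_getD, List.getElem?_set_ne (Ne.symm hne),
          ← List.getD_eq_getElem?_getD]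
      by_cases hji : j = i
      · rw [hji, hgeteq]
        split_ifs <;> omega
      · rw [hgetne j hji]
        have hchain : ¬ (j - pvLowN j < p ∧ p ≤ j ∧ i ≤ j) ∨ i + pvLowN i ≤ j := by
          by_cases hcov : j - pvLowN j < p ∧ p ≤ j ∧ i ≤ j
          · exact Or.inr (pvChainStep i j p (by omega) ⟨hci1, hci2⟩ ⟨hcov.1, hcov.2.1⟩ (by omega))
          · exact Or.inl hcov
        rcases hchain with h | h <;> split_ifs <;> omega
    · rw [pvUpdate.eq_def, dif_neg (by omega)]
      have : ¬ (j - pvLowN j < p ∧ p ≤ j ∧ i ≤ j) := by omega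
      simp [this]

-- the query loop sums the cells partitioning [1, q]
theorem pvQuery_getD (vals tree pref : List Int) (hTI : pvTI vals tree pref) :
    ∀ q : Nat, q ≤ vals.length + 1 → ∀ res : Int,
      pvQuery tree (q : Int) res =
        res + (pref.countP (fun x => decide (pvPos vals x + 1 ≤ q)) : Int) := by
  intro q
  induction q using Nat.strong_induction_on with
  | _ q ih =>
    intro hq res
    rcases Nat.eq_zero_or_pos q with hq0 | hqpos
    · subst hq0
      rw [pvQuery.eq_def, dif_neg (by omega)]
      have h0 : pref.countP (fun x => decide (pvPos vals x + 1 ≤ 0)) = 0 := by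
        rw [List.countP_eq_zero]
        intro a _
        simp only [decide_eq_true_eq]
        omega
      rw [h0]
      push_cast
      ring
    · rw [pvQuery.eq_def, dif_pos (by omega)]
      have hband : PySem.Int.band (q : Int) (-(q : Int)) = ((pvLowN q : Nat) : Int) := by
        rw [pvBand_eq_lowN _ (by omega)]
        simp
      have hlow_pos := pvLowN_pos q
      have hlow_le := pvLowN_le q hqpos
      have hstep : (q : Int) - PySem.Int.band (q : Int) (-(q : Int)) = ((q - pvLowN q : Nat) : Int) := by
        rw [hband]
        omega
      rw [hstep]
      rw [ih (q - pvLowN q) (by omega) (by omega)]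
      have hget : PySem.List.pyGetD tree (q : Int) 0 = tree.getD q 0 := by
        rw [PySem.List.pyGetD_natCast]
      rw [hget, hTI.2 q hqpos hq]
      have hsplit := pvCountP_le_split vals pref (q - pvLowN q) q (by omega)
      omega

-- the common output description (B's per-step expression, recursively)
def pvOut (pref : List Int) : List Int → List Int
  | [] => []
  | num :: rest =>
      ((pref.filter (fun x => num ≤ x)).map (fun _ => (1 : Int))).sum ::
        pvOut (pref ++ [num]) rest

-- B's fold produces pvOut
theorem pvFoldB (rest : List Int) : ∀ (pref result : List Int),
    (rest.foldl
      (fun (st : List Int × List Int) num =>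
        (st.1 ++ [((st.2.filter (fun x => num ≤ x)).map (fun _ => (1 : Int))).sum],
         st.2 ++ [num]))
      (result, pref)).1 = result ++ pvOut pref rest := by
  induction rest with
  | nil => intro pref result; simp [pvOut]
  | cons num rest ih =>
    intro pref result
    simp only [List.foldl_cons]
    rw [ih]
    simp [pvOut]

-- B's per-step value is the count of seen elements ≥ num
theorem pvOut_head (pref : List Int) (num : Int) :
    ((pref.filter (fun x => num ≤ x)).map (fun _ => (1 : Int))).sum =
      (pref.countP (fun x => decide (num ≤ x)) : Int) := by
  rw [PySem.List.sum_map_const_int, List.countP_eq_length_filter]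
  ring

-- the dictionary built from enumerate keeps exactly its (value, index) pairs
theorem pvDict_items (vals : List Int) (hnd : vals.Nodup) :
    (PySem.Dict.ofList ((PySem.List.enumerate vals 0).map (fun p => (p.2, p.1)))).items
      = (PySem.List.enumerate vals 0).map (fun p => (p.2, p.1)) := by
  set ps := (PySem.List.enumerate vals 0).map (fun p => (p.2, p.1)) with hps
  have hkeys : (ps.map (fun a : Int × Int => a.1)).Nodup := by
    rw [hps, List.map_map]
    have h1 : ((fun a : Int × Int => a.1) ∘ (fun p : Int × Int => (p.2, p.1)))
        = (fun x : Int × Int => x.2) := rfl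
    rw [h1, PySem.List.map_snd_enumerate]
    exact hnd
  have hfold : PySem.Dict.ofList ps
      = ps.foldl (fun d (a : Int × Int) => d.insert a.1 a.2) PySem.Dict.empty := rfl
  rw [hfold,
    PySem.Dict.items_foldl_insert_fresh ps (fun a => a.1) (fun a => a.2) _ (fun a _ => rfl) hkeys]
  simp [PySem.Dict.empty]

theorem pvIdx_get (vals : List Int) (hp : vals.Pairwise (· < ·)) (x : Int) (hx : x ∈ vals) :
    (PySem.Dict.ofList ((PySem.List.enumerate vals 0).map (fun p => (p.2, p.1)))).get? x
      = some ((pvPos vals x : Nat) : Int) := by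
  have hnd : vals.Nodup := hp.imp ne_of_lt
  obtain ⟨k, hk, rfl⟩ := List.getElem_of_mem hx
  apply PySem.Dict.get?_of_mem_items
  · rw [pvDict_items vals hnd, pvPos_getElem vals hp k hk]
    have hmem : ((k : Int), vals[k]) ∈ PySem.List.enumerate vals 0 := by
      rw [PySem.List.mem_enumerate_iff]
      exact ⟨k, hk, by simp⟩
    exact List.mem_map_of_mem hmem
  · exact PySem.Dict.nodup_keys_ofList _

-- complement count: |pref| - #(< num) = #(≥ num), position-wise
theorem pvCount_compl (vals pref : List Int) (hp : vals.Pairwise (· < ·)) (num : Int)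
    (hnum : num ∈ vals) (hmem : ∀ x ∈ pref, x ∈ vals) :
    (pref.length : Int) - (pref.countP (fun x => decide (pvPos vals x < pvPos vals num)) : Int)
      = (pref.countP (fun x => decide (num ≤ x)) : Int) := by
  have h1 : pref.length = pref.countP (fun x => decide (pvPos vals x < pvPos vals num)) +
      pref.countP (fun x => decide (num ≤ x)) := by
    rw [List.length_eq_countP_add_countP (fun x => decide (pvPos vals x < pvPos vals num))]
    congr 1
    refine List.countP_congr (fun x hx => ?_)
    have hiff := pvPos_lt_iff vals hp x num (hmem x hx) hnum
    simp only [decide_eq_true_eq]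
    constructor
    · intro h
      by_contra hcon
      exact h (hiff.mpr (not_le.mp hcon))
    · intro h hc
      have := hiff.mp hc
      omega
  omega

-- A's fold produces pvOut as well, under the tree invariant
theorem pvFoldA (vals : List Int) (hp : vals.Pairwise (· < ·)) :
    ∀ (rest pref result tree : List Int),
    (∀ x ∈ pref, x ∈ vals) → (∀ x ∈ rest, x ∈ vals) → pvTI vals tree pref →
    result.length = pref.length →
    (rest.foldl
      (fun (st : List Int × List Int) num =>
        (st.1 ++ [PySem.List.len st.1 -
          (if ((PySem.Dict.ofList ((PySem.List.enumerate vals 0).map (fun p => (p.2, p.1)))).get? num).getD 0 > 0 then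
            pvQuery st.2 ((((PySem.Dict.ofList ((PySem.List.enumerate vals 0).map (fun p => (p.2, p.1)))).get? num).getD 0 - 1) + 1) 0
          else 0)],
         pvUpdate st.2 (((PySem.Dict.ofList ((PySem.List.enumerate vals 0).map (fun p => (p.2, p.1)))).get? num).getD 0 + 1)))
      (result, tree)).1 = result ++ pvOut pref rest := by
  intro rest
  induction rest with
  | nil => intro pref result tree _ _ _ _; simp [pvOut]
  | cons num rest ih =>
    intro pref result tree hpref hrest hTI hlen
    simp only [List.foldl_cons]
    have hnum : num ∈ vals := hrest num (List.mem_cons_self)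
    have hidx : ((PySem.Dict.ofList ((PySem.List.enumerate vals 0).map (fun p => (p.2, p.1)))).get? num).getD 0
        = ((pvPos vals num : Nat) : Int) := by
      rw [pvIdx_get vals hp num hnum]
      rfl
    set k : Nat := pvPos vals num with hkdef
    have hklt : k < vals.length := pvPos_lt_length vals hp num hnum
    have hless : (if ((PySem.Dict.ofList ((PySem.List.enumerate vals 0).map (fun p => (p.2, p.1)))).get? num).getD 0 > 0 then
            pvQuery tree ((((PySem.Dict.ofList ((PySem.List.enumerate vals 0).map (fun p => (p.2, p.1)))).get? num).getD 0 - 1) + 1) 0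
          else 0)
        = (pref.countP (fun x => decide (pvPos vals x < k)) : Int) := by
      rw [hidx]
      by_cases hk0 : 0 < k
      · rw [if_pos (by omega)]
        have hc1 : ((k : Int) - 1) + 1 = (k : Int) := by ring
        rw [hc1, pvQuery_getD vals tree pref hTI k (by omega) 0]
        have hc2 : pref.countP (fun x => decide (pvPos vals x + 1 ≤ k)) =
            pref.countP (fun x => decide (pvPos vals x < k)) := by
          refine List.countP_congr (fun x _ => ?_)
          simp only [decide_eq_true_eq]
          omega
        rw [hc2]
        ring
      · rw [if_neg (by omega)]
        have hc3 : pref.countP (fun x => decide (pvPos vals x < k)) = 0 := by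
          rw [List.countP_eq_zero]
          intro a _
          simp only [decide_eq_true_eq]
          omega
        rw [hc3]
        simp
    have hval : PySem.List.len result - (pref.countP (fun x => decide (pvPos vals x < k)) : Int)
        = ((pref.filter (fun x => num ≤ x)).map (fun _ => (1 : Int))).sum := by
      rw [pvOut_head, PySem.List.len_eq, hlen]
      exact pvCount_compl vals pref hp num hnum hpref
    have hTI' : pvTI vals (pvUpdate tree ((k : Int) + 1)) (pref ++ [num]) := by
      constructor
      · rw [pvUpdate_length]; exact hTI.1
      · intro j hj hjl
        have hlen2 := hTI.1
        have hcast : (k : Int) + 1 = ((k + 1 : Nat) : Int) := by push_cast; ring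
        rw [hcast]
        have hupd := pvUpdate_getD (k + 1) tree.length tree (k + 1)
          (by omega) (by omega) (by have := pvLowN_pos (k + 1); omega) (by omega)
          j hj (by omega)
        rw [hupd, hTI.2 j hj hjl, List.countP_append]
        have hone : ([num] : List Int).countP
            (fun x => decide (j - pvLowN j < pvPos vals x + 1 ∧ pvPos vals x + 1 ≤ j))
            = if j - pvLowN j < k + 1 ∧ k + 1 ≤ j ∧ k + 1 ≤ j then 1 else 0 := by
          simp only [List.countP_cons, List.countP_nil, decide_eq_true_eq, ← hkdef]
          split_ifs <;> omega
        rw [hone]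
        split_ifs <;> push_cast <;> omega
    have ihres := ih (pref ++ [num]) (result ++ [PySem.List.len result -
          (if ((PySem.Dict.ofList ((PySem.List.enumerate vals 0).map (fun p => (p.2, p.1)))).get? num).getD 0 > 0 then
            pvQuery tree ((((PySem.Dict.ofList ((PySem.List.enumerate vals 0).map (fun p => (p.2, p.1)))).get? num).getD 0 - 1) + 1) 0
          else 0)]) (pvUpdate tree (((PySem.Dict.ofList ((PySem.List.enumerate vals 0).map (fun p => (p.2, p.1)))).get? num).getD 0 + 1))
      (by intro x hx
          rcases List.mem_append.mp hx with h | h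
          · exact hpref x h
          · simp at h; subst h; exact hnum)
      (by intro x hx; exact hrest x (List.mem_cons_of_mem _ hx))
      (by rw [hidx]; exact hTI')
      (by simp [hlen])
    rw [ihres]
    rw [hless, hval]
    simp [pvOut]

-- ===== VERDICT (by name: the statement is the Claim_ definition above) =====
theorem count_bigger_fenwick_or_equal_spec : Claim_equal_count_bigger_fenwick_or_equal := by
  intro nums _
  unfold Spec_count_bigger_fenwick_or_equal
  simp only [count_bigger_fenwick_or_equal, count_bigger_fenwick_or_equal_alt]
  set vals := PySem.List.sorted (PySem.Set.ofList nums) (fun x => x) false with hvals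
  have hp : vals.Pairwise (· < ·) := PySem.List.sorted_ofList_pairwise_lt nums
  have hTI0 : pvTI vals (List.replicate (vals.length + 2) 0) [] := by
    constructor
    · simp
    · intro j hj hjl
      rw [List.getD_replicate 0 (by omega : j < vals.length + 2)]
      simp
  rw [pvFoldA vals hp nums [] [] _ (by simp)
    (by intro x hx
        rw [hvals, PySem.List.mem_sorted]
        exact (PySem.Set.mem_ofList nums x).mpr hx)
    hTI0 rfl]
  rw [pvFoldB nums [] []]
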